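-- pv_equiv track=rewrite | github.com/KAY53N/PyHutool | pyhutool/Dict.py | dictSplit
-- ===== SOURCE A (Python) =====
-- def dictSplit(dicts, n):
--     result = []
--     ret = []
--     p = sorted([(k, v) for k, v in dicts.items()], reverse=True)
--     s = set()
--     for i in p:
--         s.add(i[1])
--     for i in sorted(s, reverse=True)[:n]:
--         for j in p:
--             if j[1] == i:
--                 result.append(j)
--     for r in result:
--         ret.append(r[0])
--     return ret
-- ===== SOURCE B (Python) =====
-- def dictSplit(dicts, n):
--     p = sorted(dicts.items(), reverse=True)
--     buckets = {}
--     for k, v in p: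
--         buckets.setdefault(v, []).append(k)
--     return [k for v in sorted(buckets, reverse=True)[:n] for k in buckets[v]]
-- ===== Notes on version B (the rewrite author's own statement) =====
-- stated objective: alternative
-- what changed: Instead of re-scanning the whole sorted pair list once per selected value, B groups keys into value-buckets in one pass over the sorted pairs and then concatenates the buckets of the top-n distinct values.
import Mathlib
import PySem

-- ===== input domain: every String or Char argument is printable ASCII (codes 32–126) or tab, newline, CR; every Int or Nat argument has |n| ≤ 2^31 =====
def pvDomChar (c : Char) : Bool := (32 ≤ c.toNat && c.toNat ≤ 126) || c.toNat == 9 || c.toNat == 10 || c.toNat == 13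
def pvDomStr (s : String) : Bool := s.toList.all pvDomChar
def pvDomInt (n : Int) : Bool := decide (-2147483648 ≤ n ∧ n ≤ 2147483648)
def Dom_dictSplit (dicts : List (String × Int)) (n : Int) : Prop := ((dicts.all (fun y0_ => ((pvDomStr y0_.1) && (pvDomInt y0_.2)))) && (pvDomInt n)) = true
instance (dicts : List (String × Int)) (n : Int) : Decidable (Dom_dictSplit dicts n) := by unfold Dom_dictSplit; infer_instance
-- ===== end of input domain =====

-- B replaces A's per-selected-value rescans of the pair list by one grouping pass
-- into value buckets (alternative algorithm; return value proved identical).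
-- The dict parameter arrives as an association list; both ports read it as the dict it denotes (PySem.Dict.ofList).

-- ===== PORT A =====
def dictSplit (dicts : List (String × Int)) (n : Int) : List String :=
  -- p = sorted([(k, v) for k, v in dicts.items()], reverse=True)  (tuple comparison)
  let p := PySem.List.sorted2 (PySem.Dict.ofList dicts).items (·.1) (·.2) true
  -- s = set(); for i in p: s.add(i[1])
  let s := p.foldl (fun s i => PySem.Set.add s i.2) PySem.Set.empty
  -- for i in sorted(s, reverse=True)[:n]: for j in p: if j[1] == i: result.append(j)
  let result := (PySem.List.slice (PySem.List.sorted s (fun x => x) true) none (some n)).foldl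
    (fun result i => p.foldl (fun result j => if j.2 == i then result ++ [j] else result) result) []
  -- for r in result: ret.append(r[0])
  result.foldl (fun ret r => ret ++ [r.1]) []

-- ===== PORT B =====
def dictSplit_alt (dicts : List (String × Int)) (n : Int) : List String :=
  -- p = sorted(dicts.items(), reverse=True)
  let p := PySem.List.sorted2 (PySem.Dict.ofList dicts).items (·.1) (·.2) true
  -- buckets = {}; for k, v in p: buckets.setdefault(v, []).append(k)
  let buckets := p.foldl (fun d kv => d.modify kv.2 [] (· ++ [kv.1])) PySem.Dict.empty
  -- [k for v in sorted(buckets, reverse=True)[:n] for k in buckets[v]]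
  (PySem.List.slice (PySem.List.sorted buckets.keys (fun x => x) true) none (some n)).flatMap
    (fun v => buckets.getD v [])

-- ===== PRECONDITION & SPEC =====
def Spec_dictSplit (dicts : List (String × Int)) (n : Int) (out : List String) : Prop := out = dictSplit_alt dicts n
instance (dicts : List (String × Int)) (n : Int) (out : List String) : Decidable (Spec_dictSplit dicts n out) := by unfold Spec_dictSplit; infer_instance

-- ===== CLAIM (what is proved, stated in full; the proofs are below) =====
def Claim_equal_dictSplit : Prop := ∀ (dicts : List (String × Int)) (n : Int), Dom_dictSplit dicts n → Spec_dictSplit dicts n (dictSplit dicts n)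

-- ===== LEMMAS AND PROOFS =====

-- A's value-set equals B's bucket keys: both are the distinct values of p in first-occurrence order.
theorem pv_set_eq_keys (p : List (String × Int)) :
    p.foldl (fun s i => PySem.Set.add s i.2) PySem.Set.empty
      = (p.foldl (fun d kv => d.modify kv.2 [] (· ++ [kv.1])) PySem.Dict.empty).keys := by
  rw [PySem.Dict.keys_foldl_modify_key p (·.2) [] (fun _ kv => (· ++ [kv.1])) PySem.Dict.empty]
  simp only [PySem.Dict.keys_empty, PySem.Set.update, ← List.foldl_map]
  rfl

-- B's bucket for v is exactly A's filter of p at value v, projected to keys.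
theorem pv_bucket_eq_filter (p : List (String × Int)) (v : Int) :
    (p.foldl (fun d kv => d.modify kv.2 [] (· ++ [kv.1])) PySem.Dict.empty).getD v []
      = (p.filter (fun j => j.2 == v)).map (·.1) := by
  have h := PySem.Dict.getD_foldl_modify_append (p.map (fun kv => (kv.2, kv.1))) PySem.Dict.empty v
  rw [List.foldl_map] at h
  simpa [List.filter_map, Function.comp_def, List.map_map] using h

-- the shared core: A's rescans-then-project equals B's bucket concatenation
theorem pv_core (p : List (String × Int)) (n : Int) :
    ((PySem.List.slice (PySem.List.sorted (p.foldl (fun s i => PySem.Set.add s i.2) PySem.Set.empty) (fun x => x) true) none (some n)).foldl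
        (fun result i => p.foldl (fun result j => if j.2 == i then result ++ [j] else result) result) []).foldl
      (fun ret r => ret ++ [r.1]) []
    = (PySem.List.slice (PySem.List.sorted (p.foldl (fun d kv => d.modify kv.2 [] (· ++ [kv.1])) PySem.Dict.empty).keys (fun x => x) true) none (some n)).flatMap
        (fun v => (p.foldl (fun d kv => d.modify kv.2 [] (· ++ [kv.1])) PySem.Dict.empty).getD v []) := by
  rw [pv_set_eq_keys]
  generalize (PySem.List.slice (PySem.List.sorted (p.foldl (fun d kv => d.modify kv.2 [] (· ++ [kv.1])) PySem.Dict.empty).keys (fun x => x) true) none (some n)) = vs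
  have h1 : ∀ (i : Int) (res : List (String × Int)),
      p.foldl (fun result j => if j.2 == i then result ++ [j] else result) res
        = res ++ p.filter (fun j => j.2 == i) := by
    intro i res
    simpa using PySem.List.foldl_append_if (fun j => j.2 == i) id p res
  simp only [h1, PySem.List.foldl_append_eq_flatMap, List.nil_append, pv_bucket_eq_filter]
  simp [List.flatMap_assoc, ← List.map_eq_flatMap]

-- ===== VERDICT (by name: the statement is the Claim_ definition above) =====
theorem dictSplit_spec : Claim_equal_dictSplit := by
  intro dicts n _
  show dictSplit dicts n = dictSplit_alt dicts n
  exact pv_core (PySem.List.sorted2 (PySem.Dict.ofList dicts).items (·.1) (·.2) true) n
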